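-- pv_equiv track=rewrite | github.com/wcmrg77/voice-dictate | voice_dictate.py | _reattach_trailing_punct
-- ===== SOURCE A (Python) =====
-- def _strip_ws(s: str) -> str:
--     """Collapse to non-whitespace characters for the sanity check."""
--     return "".join(s.split())
--
-- _TRAIL_PUNCT = set(".!?,;:")
--
-- def _reattach_trailing_punct(raw: str, formatted: str) -> str | None:
--     """
--     If `formatted` is `raw` missing ONLY trailing punctuation at the very end
--     (e.g. the LLM dropped the final "." from "Gregor."), return a patched
--     version with that punctuation re-appended. Otherwise return None.
--     """
--     raw_ws = _strip_ws(raw)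
--     fmt_ws = _strip_ws(formatted)
--     if not raw_ws.startswith(fmt_ws) or raw_ws == fmt_ws:
--         return None
--     missing = raw_ws[len(fmt_ws):]
--     if not all(c in _TRAIL_PUNCT for c in missing):
--         return None
--     return formatted.rstrip() + missing
-- ===== SOURCE B (Python) =====
-- _TRAIL_PUNCT = set(".!?,;:")
--
-- def _reattach_trailing_punct(raw, formatted):
--     """Single lockstep pass over the two strings' non-whitespace characters;
--     whatever is left of `raw`'s stream must be the dropped punctuation."""
--     it = iter(c for c in raw if not c.isspace())
--     for c in formatted:
--         if c.isspace():
--             continue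
--         if next(it, None) != c:
--             return None
--     missing = "".join(it)
--     if missing and all(c in _TRAIL_PUNCT for c in missing):
--         return formatted.rstrip() + missing
--     return None
-- ===== Notes on version B (the rewrite author's own statement) =====
-- stated objective: alternative
-- what changed: Replaces A's build-both-stripped-strings + startswith + slice + all-in-set pipeline by a single lockstep pass over the two strings' non-whitespace character streams (a generator over raw consumed while iterating formatted), the stream's remainder being the missing punctuation.
import Mathlib
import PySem

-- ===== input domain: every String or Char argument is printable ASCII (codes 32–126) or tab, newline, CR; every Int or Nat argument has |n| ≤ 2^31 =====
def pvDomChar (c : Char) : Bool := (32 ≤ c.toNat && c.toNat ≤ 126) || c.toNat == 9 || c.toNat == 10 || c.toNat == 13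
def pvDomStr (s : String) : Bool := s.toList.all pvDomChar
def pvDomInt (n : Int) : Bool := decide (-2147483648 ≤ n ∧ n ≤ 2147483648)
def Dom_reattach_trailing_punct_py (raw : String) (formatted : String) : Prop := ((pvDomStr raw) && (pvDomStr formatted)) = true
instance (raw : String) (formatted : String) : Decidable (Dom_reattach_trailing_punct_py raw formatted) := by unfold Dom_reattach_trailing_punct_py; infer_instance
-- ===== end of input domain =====

-- B replaces A's strip/startswith/slice pipeline by one lockstep pass over the two
-- non-whitespace character streams (objective: alternative, same cost).

-- ===== PORT A =====
-- _strip_ws(s) = "".join(s.split())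
def pvStripWs (s : List Char) : List Char :=
  PySem.Chars.join [] (PySem.Chars.split₀ s)

-- _TRAIL_PUNCT = set(".!?,;:")
def pvTrailPunct : PySem.Set Char := PySem.Set.ofList ".!?,;:".toList

def reattach_trailing_punct_py (raw : String) (formatted : String) : Option String :=
  let raw_ws := pvStripWs raw.toList
  let fmt_ws := pvStripWs formatted.toList
  if !(PySem.Chars.startswith raw_ws fmt_ws) || raw_ws == fmt_ws then
    none
  else
    let missing := PySem.List.slice raw_ws (some (fmt_ws.length : Int)) none
    if !(missing.all fun c => PySem.Set.contains pvTrailPunct c) then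
      none
    else
      some (String.ofList (PySem.Chars.rstrip formatted.toList ++ missing))

-- ===== PORT B =====
-- the for-loop over `formatted` (skipping whitespace) consuming the iterator over
-- `raw`'s non-whitespace characters; returns the iterator's remainder ("missing")
def pvBLoop : List Char → List Char → Option (List Char)
  | it, [] => some it
  | it, c :: fs =>
    if PySem.Chars.isspace c then pvBLoop it fs
    else
      match it with
      | [] => none
      | d :: it' => if d = c then pvBLoop it' fs else none

def pvTrailPunctB : PySem.Set Char := PySem.Set.ofList ".!?,;:".toList

def reattach_trailing_punct_py_alt (raw : String) (formatted : String) : Option String :=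
  match pvBLoop (raw.toList.filter fun c => !PySem.Chars.isspace c) formatted.toList with
  | none => none
  | some missing =>
    if missing ≠ [] ∧ (missing.all fun c => PySem.Set.contains pvTrailPunctB c) then
      some (String.ofList (PySem.Chars.rstrip formatted.toList ++ missing))
    else
      none

-- ===== PRECONDITION & SPEC =====
def Spec_reattach_trailing_punct_py (raw : String) (formatted : String) (out : Option String) : Prop := out = reattach_trailing_punct_py_alt raw formatted
instance (raw : String) (formatted : String) (out : Option String) : Decidable (Spec_reattach_trailing_punct_py raw formatted out) := by unfold Spec_reattach_trailing_punct_py; infer_instance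

-- ===== CLAIM (what is proved, stated in full; the proofs are below) =====
def Claim_equal_reattach_trailing_punct_py : Prop := ∀ (raw : String) (formatted : String), Dom_reattach_trailing_punct_py raw formatted → Spec_reattach_trailing_punct_py raw formatted (reattach_trailing_punct_py raw formatted)

-- ===== LEMMAS AND PROOFS =====

theorem pv_join_nil_eq_flatten (parts : List (List Char)) :
    PySem.Chars.join [] parts = parts.flatten := by
  induction parts with
  | nil => rfl
  | cons p ps ih =>
    simp [PySem.Chars.join, List.intercalate] at ih ⊢
    cases ps with
    | nil => simp
    | cons q qs => simpa [List.intersperse, List.intercalate] using ih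

theorem pv_go_spec (s : List Char) : ∀ (cur : List Char) (acc : List (List Char)),
    (PySem.Chars.split₀.go s cur acc).flatten
      = acc.reverse.flatten ++ cur.reverse ++ s.filter (fun c => !PySem.Chars.isspace c) := by
  induction s with
  | nil =>
    intro cur acc
    by_cases h : cur.isEmpty
    · simp_all [PySem.Chars.split₀.go, List.isEmpty_iff]
    · simp_all [PySem.Chars.split₀.go]
  | cons c rest ih =>
    intro cur acc
    by_cases hs : PySem.Chars.isspace c
    · by_cases h : cur.isEmpty
      · simp_all [PySem.Chars.split₀.go, List.isEmpty_iff]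
      · simp [PySem.Chars.split₀.go, hs, h, ih]
    · simp [PySem.Chars.split₀.go, hs, ih]

theorem pv_stripWs_eq_filter (s : List Char) :
    pvStripWs s = s.filter (fun c => !PySem.Chars.isspace c) := by
  simp [pvStripWs, PySem.Chars.split₀, pv_join_nil_eq_flatten, pv_go_spec]

theorem pv_bLoop_spec (fs : List Char) : ∀ (it : List Char),
    pvBLoop it fs =
      (if (fs.filter fun c => !PySem.Chars.isspace c).isPrefixOf it then
        some (it.drop (fs.filter fun c => !PySem.Chars.isspace c).length)
      else none) := by
  induction fs with
  | nil => intro it; simp [pvBLoop]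
  | cons c fs ih =>
    intro it
    by_cases hs : PySem.Chars.isspace c
    · simp [pvBLoop, hs, ih]
    · cases it with
      | nil => simp [pvBLoop, hs]
      | cons d it' =>
        by_cases hdc : d = c
        · simp [pvBLoop, hs, hdc, ih]
        · simp [pvBLoop, hs, hdc, List.isPrefixOf, Ne.symm hdc]

-- ===== VERDICT (by name: the statement is the Claim_ definition above) =====
theorem reattach_trailing_punct_py_spec : Claim_equal_reattach_trailing_punct_py := by
  intro raw formatted _
  unfold Spec_reattach_trailing_punct_py reattach_trailing_punct_py reattach_trailing_punct_py_alt
  rw [pv_bLoop_spec, pv_stripWs_eq_filter, pv_stripWs_eq_filter]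
  generalize List.filter (fun c => !PySem.Chars.isspace c) raw.toList = r
  generalize List.filter (fun c => !PySem.Chars.isspace c) formatted.toList = f
  generalize PySem.Chars.rstrip formatted.toList = w
  by_cases hpre : f.isPrefixOf r
  · have hpre' : f <+: r := List.isPrefixOf_iff_prefix.mp hpre
    have hsw : PySem.Chars.startswith r f = true := by
      rw [PySem.Chars.startswith_iff]; exact hpre'
    simp only [hpre, hsw, if_true, Bool.not_true, Bool.false_or]
    obtain ⟨t, ht⟩ := hpre'
    subst ht
    have hdrop : (f ++ t).drop f.length = t := by simp
    have hslice : PySem.List.slice (f ++ t) (some (f.length : Int)) none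
        = (f ++ t).drop f.length := by simp [PySem.List.slice_from]
    by_cases htnil : t = []
    · subst htnil; simp
    · have hbeq : (f ++ t == f) = false := by
        rw [beq_eq_false_iff_ne]
        simpa using htnil
      simp only [hbeq, hslice, hdrop, htnil, ne_eq, not_false_iff, true_and]
      cases hall : (t.all fun c => PySem.Set.contains pvTrailPunct c)
      · have hB : (t.all fun c => PySem.Set.contains pvTrailPunctB c) = false := hall
        simpa using hB
      · have hB : (t.all fun c => PySem.Set.contains pvTrailPunctB c) = true := hall
        simpa using hB
  · have hsw : PySem.Chars.startswith r f = false := by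
      rw [← Bool.not_eq_true, PySem.Chars.startswith_iff]
      exact fun h => hpre (List.isPrefixOf_iff_prefix.mpr h)
    simp [hpre, hsw]
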